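-- pv_equiv track=rewrite | github.com/harshitgour1/codespire-1 | day_night.py | count_prime_instances
-- ===== SOURCE A (Python) =====
-- def is_prime(n):
--     if n < 2:
--         return False
--     for i in range(2, int(n**0.5) + 1):
--         if n % i == 0:
--             return False
--     return True
--
-- def count_prime_instances(D, P):
--     part_size = D // P
--     count = 0
--
--     for h in range(D):
--         equivalent_hours = [(h + i * part_size) % D for i in range(P)]
--         if all(is_prime(hour) for hour in equivalent_hours):
--             count += 1
--
--     return count
-- ===== SOURCE B (Python) =====
-- def count_prime_instances(D, P):
--     part_size = D // P
--     n = max(D, 0)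
--     if n == 0:
--         return 0
--     # sieve of Eratosthenes: mark d*d, d*d+d, ... as composite for every d >= 2
--     composite = set()
--     for d in range(2, n):
--         for m in range(d * d, n, d):
--             composite.add(m)
--     # distinct shifts i*part_size % D, computed once instead of once per hour
--     offsets = set()
--     for i in range(P):
--         offsets.add(i * part_size % D)
--     # h is bad iff some cyclic equivalent (h + i*part_size) % D is not prime,
--     # i.e. h = (q - off) % D for some non-prime q; count the complement
--     bad = set()
--     for q in range(n):
--         if q < 2 or q in composite:
--             for off in offsets:
--                 bad.add((q - off) % D)
--             if len(bad) == n: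
--                 break
--     return n - len(bad)
-- ===== Notes on version B (the rewrite author's own statement) =====
-- stated objective: faster
-- what changed: B replaces A's per-hour trial-division primality tests by one sieve of composites over range(D), deduplicates the P shifts i*part_size % D into a set once, and instead of testing every hour's equivalents builds the set of bad hours (q - off) % D from each non-prime q (stopping once every hour is bad) and returns D minus its size.
import Mathlib
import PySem

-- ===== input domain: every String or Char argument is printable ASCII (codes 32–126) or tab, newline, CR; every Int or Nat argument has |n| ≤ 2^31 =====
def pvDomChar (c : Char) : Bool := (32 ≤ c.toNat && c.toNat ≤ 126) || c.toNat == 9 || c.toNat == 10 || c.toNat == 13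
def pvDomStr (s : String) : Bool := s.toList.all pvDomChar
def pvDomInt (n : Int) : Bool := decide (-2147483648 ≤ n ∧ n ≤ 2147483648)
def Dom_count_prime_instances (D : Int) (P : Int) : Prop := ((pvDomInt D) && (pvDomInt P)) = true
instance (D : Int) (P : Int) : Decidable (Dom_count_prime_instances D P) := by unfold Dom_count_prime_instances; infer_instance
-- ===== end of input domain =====

-- B replaces A's per-hour trial-division primality tests by one sieve pass, deduplicates the
-- P shifts once, and counts the complement of the set of "bad" hours generated from the
-- non-primes, stopping early once every hour is bad (objective: faster).

-- ===== PORT A =====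
-- is_prime(n): trial division up to int(n**0.5); int(n**0.5) = Nat.sqrt n.toNat, exact for 0 ≤ n ≤ 2^31 (double sqrt of such ints never crosses an integer)
def pvIsPrime (n : Int) : Bool :=
  if n < 2 then false
  else (PySem.List.pyRange 2 ((Nat.sqrt n.toNat : Int) + 1) 1).all
    (fun i => !(PySem.Int.mod n i == 0))

def count_prime_instances (D : Int) (P : Int) : Int :=
  let part_size := PySem.Int.floordiv D P
  (PySem.List.pyRange 0 D 1).foldl (fun count h =>
    let equivalent_hours := (PySem.List.pyRange 0 P 1).map
      (fun i => PySem.Int.mod (h + i * part_size) D)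
    if equivalent_hours.all (fun hour => pvIsPrime hour) then count + 1 else count) 0

-- ===== PORT B =====
-- loop body of Source B's bad-building loop, with its break ('if len(bad) == n: break') as a stop flag
def pvBadStep (D n : Int) (composite offsets : PySem.Set Int)
    (st : PySem.Set Int × Bool) (q : Int) : PySem.Set Int × Bool :=
  match st with
  | (bad, true) => (bad, true)
  | (bad, false) =>
    if q < 2 || PySem.Set.contains composite q then
      let bad := offsets.foldl (fun s off => PySem.Set.add s (PySem.Int.mod (q - off) D)) bad
      if PySem.Set.len bad == n then (bad, true) else (bad, false)
    else (bad, false)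

def count_prime_instances_alt (D : Int) (P : Int) : Int :=
  let part_size := PySem.Int.floordiv D P
  let n := max D 0
  if n == 0 then 0
  else
    let composite : PySem.Set Int :=
      (PySem.List.pyRange 2 n 1).foldl (fun s d =>
        (PySem.List.pyRange (d * d) n d).foldl (fun s m => PySem.Set.add s m) s)
        PySem.Set.empty
    let offsets : PySem.Set Int :=
      (PySem.List.pyRange 0 P 1).foldl
        (fun s i => PySem.Set.add s (PySem.Int.mod (i * part_size) D)) PySem.Set.empty
    let bad : PySem.Set Int :=
      ((PySem.List.pyRange 0 n 1).foldl (pvBadStep D n composite offsets)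
        (PySem.Set.empty, false)).1
    n - PySem.Set.len bad

-- ===== PRECONDITION & SPEC =====
-- A raises ZeroDivisionError at D // P when P = 0; that is all Pre_ excludes.
def Pre_count_prime_instances (D : Int) (P : Int) : Prop := P ≠ 0
instance (D : Int) (P : Int) : Decidable (Pre_count_prime_instances D P) := by unfold Pre_count_prime_instances; infer_instance
def pvWitness_count_prime_instances : Int × Int := (10, 2)
def Spec_count_prime_instances (D : Int) (P : Int) (out : Int) : Prop := out = count_prime_instances_alt D P
instance (D : Int) (P : Int) (out : Int) : Decidable (Spec_count_prime_instances D P out) := by unfold Spec_count_prime_instances; infer_instance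

-- ===== CLAIM (what is proved, stated in full; the proofs are below) =====
def Claim_equal_count_prime_instances : Prop := ∀ (D : Int) (P : Int), Dom_count_prime_instances D P → Pre_count_prime_instances D P → Spec_count_prime_instances D P (count_prime_instances D P)

-- ===== LEMMAS AND PROOFS =====

-- membership in the nested composite-building fold
theorem pv_mem_foldl_inner (g : Int → List Int) (l : List Int) (s : PySem.Set Int) (y : Int) :
    y ∈ l.foldl (fun s d => (g d).foldl (fun s m => PySem.Set.add s m) s) s ↔
      y ∈ s ∨ ∃ d ∈ l, y ∈ g d := by
  induction l generalizing s with
  | nil => simp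
  | cons d l ih =>
      simp only [List.foldl_cons, ih, PySem.Set.mem_foldl_add (f := fun m => m)]
      constructor
      · rintro ((h | ⟨b, hb, rfl⟩) | ⟨d', hd', hy⟩)
        · exact Or.inl h
        · exact Or.inr ⟨d, List.mem_cons_self .., hb⟩
        · exact Or.inr ⟨d', List.mem_cons_of_mem _ hd', hy⟩
      · rintro (h | ⟨d', hd', hy⟩)
        · exact Or.inl (Or.inl h)
        · rcases List.mem_cons.mp hd' with rfl | hd'
          · exact Or.inl (Or.inr ⟨y, hy, rfl⟩)
          · exact Or.inr ⟨d', hd', hy⟩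

-- nodup of add-folds
theorem pv_nodup_foldl_add (f : Int → Int) (l : List Int) (s : PySem.Set Int)
    (hs : s.Nodup) : (l.foldl (fun s i => PySem.Set.add s (f i)) s).Nodup := by
  induction l generalizing s with
  | nil => exact hs
  | cons i l ih => exact ih _ (PySem.Set.nodup_add _ _ hs)

-- d ≤ Nat.sqrt q ↔ d*d ≤ q, over Int
theorem pv_sqrt_iff (q d : Int) (hq : 0 ≤ q) (hd : 0 ≤ d) :
    d ≤ (Nat.sqrt q.toNat : Int) ↔ d * d ≤ q := by
  obtain ⟨e, rfl⟩ := Int.eq_ofNat_of_zero_le hd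
  have h1 : ((e : Int) ≤ (Nat.sqrt q.toNat : Int)) ↔ e ≤ Nat.sqrt q.toNat := by exact_mod_cast Iff.rfl
  rw [h1, Nat.le_sqrt]
  have : ((e * e : Nat) : Int) = (e : Int) * e := by push_cast; ring
  omega

-- pvIsPrime q = false ↔ q < 2 or q has a divisor d with 2 ≤ d and d*d ≤ q
theorem pv_isPrime_false_iff (q : Int) (hq : 0 ≤ q) :
    pvIsPrime q = false ↔ (q < 2 ∨ ∃ d : Int, 2 ≤ d ∧ d * d ≤ q ∧ d ∣ q) := by
  unfold pvIsPrime
  by_cases h2 : q < 2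
  · simp [h2]
  · rw [if_neg h2, List.all_eq_false]
    constructor
    · rintro ⟨d, hd, hmod⟩
      rw [PySem.List.mem_pyRange_one] at hd
      obtain ⟨hd2, hdlt⟩ := hd
      have hdq : d * d ≤ q := by
        rw [← pv_sqrt_iff q d hq (by omega)]; omega
      refine Or.inr ⟨d, hd2, hdq, ?_⟩
      rw [← PySem.Int.mod_eq_zero_iff_dvd]
      simpa using hmod
    · rintro (h | ⟨d, hd2, hdq, hdvd⟩)
      · exact absurd h h2
      · have hle : d ≤ (Nat.sqrt q.toNat : Int) := by
          rw [pv_sqrt_iff q d hq (by omega)]; exact hdq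
        refine ⟨d, ?_, ?_⟩
        · rw [PySem.List.mem_pyRange_one]; exact ⟨hd2, by omega⟩
        · rw [← PySem.Int.mod_eq_zero_iff_dvd] at hdvd
          simp [hdvd]

-- members of the composite set are exactly the q < n with such a small divisor
theorem pv_mem_composite (n q : Int) :
    (q ∈ (PySem.List.pyRange 2 n 1).foldl (fun s d =>
      (PySem.List.pyRange (d * d) n d).foldl (fun s m => PySem.Set.add s m) s)
      PySem.Set.empty) ↔
    ∃ d : Int, 2 ≤ d ∧ d < n ∧ d * d ≤ q ∧ q < n ∧ d ∣ q := by
  rw [pv_mem_foldl_inner]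
  constructor
  · rintro (h | ⟨d, hd, hq⟩)
    · simp [PySem.Set.empty] at h
    · rw [PySem.List.mem_pyRange_one] at hd
      rw [PySem.List.mem_pyRange_iff_of_pos (by omega : (0:Int) < d)] at hq
      obtain ⟨h1, h2, h3⟩ := hq
      refine ⟨d, hd.1, hd.2, h1, h2, ?_⟩
      have h4 : q = (q - d * d) + d * d := by ring
      rw [h4]
      exact dvd_add h3 (dvd_mul_right d d)
  · rintro ⟨d, hd2, hdn, h1, h2, h3⟩
    refine Or.inr ⟨d, PySem.List.mem_pyRange_one.mpr ⟨hd2, hdn⟩, ?_⟩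
    rw [PySem.List.mem_pyRange_iff_of_pos (by omega : (0:Int) < d)]
    exact ⟨h1, h2, dvd_sub h3 (dvd_mul_right d d)⟩

-- B's guard holds exactly when pvIsPrime q = false (for 0 ≤ q < n)
theorem pv_guard_iff (n q : Int) (hq : 0 ≤ q) (hqn : q < n) :
    (decide (q < 2) || PySem.Set.contains ((PySem.List.pyRange 2 n 1).foldl (fun s d =>
      (PySem.List.pyRange (d * d) n d).foldl (fun s m => PySem.Set.add s m) s)
      PySem.Set.empty) q) = true ↔ pvIsPrime q = false := by
  rw [Bool.or_eq_true, decide_eq_true_eq, PySem.Set.contains_iff, pv_mem_composite,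
    pv_isPrime_false_iff q hq]
  constructor
  · rintro (h | ⟨d, hd2, hdn, h1, h2, h3⟩)
    · exact Or.inl h
    · exact Or.inr ⟨d, hd2, h1, h3⟩
  · rintro (h | ⟨d, hd2, h1, h3⟩)
    · exact Or.inl h
    · refine Or.inr ⟨d, hd2, ?_, h1, hqn, h3⟩
      have hdd : d ≤ d * d := le_mul_of_one_le_left (by omega) (by omega)
      linarith

-- shifting back and forth modulo D
theorem pv_mod_shift₁ (D c q : Int) (hD : 0 < D) (hq : 0 ≤ q) (hq2 : q < D) :
    PySem.Int.mod (PySem.Int.mod (q - c) D + c) D = q := by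
  rw [PySem.Int.mod_eq_emod_of_pos hD, PySem.Int.mod_eq_emod_of_pos hD]
  have h1 : (q - c) % D ≡ q - c [ZMOD D] := Int.emod_emod_of_dvd _ dvd_rfl
  calc ((q - c) % D + c) % D = (q - c + c) % D := Int.ModEq.add_right c h1
    _ = q % D := by ring_nf
    _ = q := Int.emod_eq_of_lt hq hq2

theorem pv_mod_shift₂ (D c h : Int) (hD : 0 < D) (hh : 0 ≤ h) (hh2 : h < D) :
    PySem.Int.mod (PySem.Int.mod (h + c) D - c) D = h := by
  rw [PySem.Int.mod_eq_emod_of_pos hD, PySem.Int.mod_eq_emod_of_pos hD]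
  have h1 : (h + c) % D ≡ h + c [ZMOD D] := Int.emod_emod_of_dvd _ dvd_rfl
  calc ((h + c) % D - c) % D = (h + c - c) % D := Int.ModEq.sub_right c h1
    _ = h % D := by ring_nf
    _ = h := Int.emod_eq_of_lt hh hh2

-- subtracting a residue is the same as subtracting the number
theorem pv_mod_sub_mod (D c q : Int) (hD : 0 < D) :
    PySem.Int.mod (q - PySem.Int.mod c D) D = PySem.Int.mod (q - c) D := by
  rw [PySem.Int.mod_eq_emod_of_pos hD, PySem.Int.mod_eq_emod_of_pos hD,
    PySem.Int.mod_eq_emod_of_pos hD]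
  have h1 : c % D ≡ c [ZMOD D] := Int.emod_emod_of_dvd _ dvd_rfl
  exact Int.ModEq.sub_left q h1

-- a Nodup list of D distinct integers inside [0, D) contains every one of them
theorem pv_full_of_len (D : Int) (hD : 0 < D) (bad : List Int) (hnd : bad.Nodup)
    (hsub : ∀ x ∈ bad, 0 ≤ x ∧ x < D) (hlen : bad.length = D.toNat) :
    ∀ x, 0 ≤ x → x < D → x ∈ bad := by
  have h1 : bad.toFinset.card = bad.length := List.toFinset_card_of_nodup hnd
  have h2 : bad.toFinset ⊆ Finset.Ico (0:ℤ) D := by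
    intro x hx
    rw [Finset.mem_Ico]
    exact hsub x (List.mem_toFinset.mp hx)
  have h3 : (Finset.Ico (0:ℤ) D).card = D.toNat := by simp [Int.card_Ico]
  have h4 : bad.toFinset = Finset.Ico (0:ℤ) D :=
    Finset.eq_of_subset_of_card_le h2 (by omega)
  intro x hx hx2
  have h5 : x ∈ Finset.Ico (0:ℤ) D := Finset.mem_Ico.mpr ⟨hx, hx2⟩
  rw [← h4] at h5
  exact List.mem_toFinset.mp h5

-- invariant of the break-flagged bad-building fold
theorem pv_break_inv (D : Int) (hD : 0 < D) (comp offs : PySem.Set Int) :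
    ∀ (l : List Int) (bad0 : PySem.Set Int) (flag : Bool),
      bad0.Nodup → (∀ x ∈ bad0, 0 ≤ x ∧ x < D) →
      (flag = true → ∀ x, 0 ≤ x → x < D → x ∈ bad0) →
      ((l.foldl (pvBadStep D D comp offs) (bad0, flag)).1.Nodup ∧
       (∀ x ∈ (l.foldl (pvBadStep D D comp offs) (bad0, flag)).1, 0 ≤ x ∧ x < D) ∧
       (∀ y, y ∈ (l.foldl (pvBadStep D D comp offs) (bad0, flag)).1 ↔
          y ∈ bad0 ∨ (flag = false ∧ ∃ q ∈ l,
            (decide (q < 2) || PySem.Set.contains comp q) = true ∧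
            ∃ off ∈ offs, y = PySem.Int.mod (q - off) D))) := by
  intro l
  induction l with
  | nil => intro bad0 flag hnd hsub _; exact ⟨hnd, hsub, fun y => by simp⟩
  | cons q l ih =>
      intro bad0 flag hnd hsub hfull
      cases flag with
      | true =>
          have hstep : pvBadStep D D comp offs (bad0, true) q = (bad0, true) := rfl
          rw [List.foldl_cons, hstep]
          obtain ⟨i1, i2, i3⟩ := ih bad0 true hnd hsub hfull
          refine ⟨i1, i2, fun y => ?_⟩
          rw [i3 y]
          simp
      | false =>
          rw [List.foldl_cons]
          by_cases hc : (decide (q < 2) || PySem.Set.contains comp q) = true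
          · have hnd' := pv_nodup_foldl_add (fun off => PySem.Int.mod (q - off) D) offs bad0 hnd
            have hsub' : ∀ x ∈ offs.foldl
                (fun s off => PySem.Set.add s (PySem.Int.mod (q - off) D)) bad0, 0 ≤ x ∧ x < D := by
              intro x hx
              rcases (PySem.Set.mem_foldl_add offs _ bad0 x).mp hx with hx0 | ⟨off, _, rfl⟩
              · exact hsub x hx0
              · exact ⟨PySem.Int.mod_nonneg _ hD, PySem.Int.mod_lt _ hD⟩
            have hmem' : ∀ y, y ∈ offs.foldl
                (fun s off => PySem.Set.add s (PySem.Int.mod (q - off) D)) bad0 ↔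
                y ∈ bad0 ∨ ∃ off ∈ offs, y = PySem.Int.mod (q - off) D :=
              fun y => PySem.Set.mem_foldl_add offs _ bad0 y
            by_cases hlen : (PySem.Set.len (offs.foldl
                (fun s off => PySem.Set.add s (PySem.Int.mod (q - off) D)) bad0) == D) = true
            · have hstep : pvBadStep D D comp offs (bad0, false) q =
                  (offs.foldl (fun s off => PySem.Set.add s (PySem.Int.mod (q - off) D)) bad0,
                   true) := by
                simp only [pvBadStep]
                rw [if_pos hc, if_pos hlen]
              rw [hstep]
              have hlenN : (offs.foldl
                  (fun s off => PySem.Set.add s (PySem.Int.mod (q - off) D)) bad0).length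
                  = D.toNat := by
                have hEq : PySem.Set.len (offs.foldl
                    (fun s off => PySem.Set.add s (PySem.Int.mod (q - off) D)) bad0) = D :=
                  beq_iff_eq.mp hlen
                simp only [PySem.Set.len] at hEq
                omega
              have hfull' := pv_full_of_len D hD _ hnd' hsub' hlenN
              obtain ⟨i1, i2, i3⟩ := ih _ true hnd' hsub' (fun _ => hfull')
              refine ⟨i1, i2, fun y => ?_⟩
              rw [i3 y]
              constructor
              · rintro (hy | ⟨hflag, _⟩)
                · rcases (hmem' y).mp hy with hy0 | ⟨off, hoff, rfl⟩
                  · exact Or.inl hy0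
                  · exact Or.inr ⟨rfl, q, List.mem_cons_self .., hc, off, hoff, rfl⟩
                · exact absurd hflag (by simp)
              · rintro (hy | ⟨_, q', hq', hcq', off, hoff, rfl⟩)
                · exact Or.inl ((hmem' y).mpr (Or.inl hy))
                · exact Or.inl (hfull' _ (PySem.Int.mod_nonneg _ hD) (PySem.Int.mod_lt _ hD))
            · have hstep : pvBadStep D D comp offs (bad0, false) q =
                  (offs.foldl (fun s off => PySem.Set.add s (PySem.Int.mod (q - off) D)) bad0,
                   false) := by
                simp only [pvBadStep]
                rw [if_pos hc, if_neg hlen]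
              rw [hstep]
              obtain ⟨i1, i2, i3⟩ := ih _ false hnd' hsub' (by simp)
              refine ⟨i1, i2, fun y => ?_⟩
              rw [i3 y]
              constructor
              · rintro (hy | ⟨_, q', hq', hcq', rest⟩)
                · rcases (hmem' y).mp hy with hy0 | ⟨off, hoff, rfl⟩
                  · exact Or.inl hy0
                  · exact Or.inr ⟨rfl, q, List.mem_cons_self .., hc, off, hoff, rfl⟩
                · exact Or.inr ⟨rfl, q', List.mem_cons_of_mem _ hq', hcq', rest⟩
              · rintro (hy | ⟨_, q', hq', hcq', rest⟩)
                · exact Or.inl ((hmem' y).mpr (Or.inl hy))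
                · rcases List.mem_cons.mp hq' with rfl | hq'
                  · obtain ⟨off, hoff, rfl⟩ := rest
                    exact Or.inl ((hmem' _).mpr (Or.inr ⟨off, hoff, rfl⟩))
                  · exact Or.inr ⟨rfl, q', hq', hcq', rest⟩
          · have hstep : pvBadStep D D comp offs (bad0, false) q = (bad0, false) := by
              simp only [pvBadStep]
              rw [if_neg hc]
            rw [hstep]
            obtain ⟨i1, i2, i3⟩ := ih bad0 false hnd hsub (by simp)
            refine ⟨i1, i2, fun y => ?_⟩
            rw [i3 y]
            constructor
            · rintro (hy | ⟨_, q', hq', hcq', rest⟩)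
              · exact Or.inl hy
              · exact Or.inr ⟨rfl, q', List.mem_cons_of_mem _ hq', hcq', rest⟩
            · rintro (hy | ⟨_, q', hq', hcq', rest⟩)
              · exact Or.inl hy
              · rcases List.mem_cons.mp hq' with rfl | hq'
                · exact absurd hcq' hc
                · exact Or.inr ⟨rfl, q', hq', hcq', rest⟩

-- B's final bad set holds exactly the hours h < D with a non-prime cyclic equivalent
theorem pv_bad_iff (D P ps h : Int) (hD : 0 < D) :
    (h ∈ ((PySem.List.pyRange 0 D 1).foldl
        (pvBadStep D D
          ((PySem.List.pyRange 2 D 1).foldl (fun s d =>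
            (PySem.List.pyRange (d * d) D d).foldl (fun s m => PySem.Set.add s m) s)
            PySem.Set.empty)
          ((PySem.List.pyRange 0 P 1).foldl
            (fun s i => PySem.Set.add s (PySem.Int.mod (i * ps) D)) PySem.Set.empty))
        (PySem.Set.empty, false)).1) ↔
      (h ∈ PySem.List.pyRange 0 D 1 ∧
        ((PySem.List.pyRange 0 P 1).map (fun i => PySem.Int.mod (h + i * ps) D)).all
          (fun hour => pvIsPrime hour) = false) := by
  have hkey := (pv_break_inv D hD
    ((PySem.List.pyRange 2 D 1).foldl (fun s d =>
      (PySem.List.pyRange (d * d) D d).foldl (fun s m => PySem.Set.add s m) s)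
      PySem.Set.empty)
    ((PySem.List.pyRange 0 P 1).foldl
      (fun s i => PySem.Set.add s (PySem.Int.mod (i * ps) D)) PySem.Set.empty)
    (PySem.List.pyRange 0 D 1) PySem.Set.empty false
    (by simp [PySem.Set.empty]) (by simp [PySem.Set.empty]) (by simp)).2.2 h
  rw [hkey]
  simp only [PySem.Set.empty, List.not_mem_nil, false_or, true_and]
  constructor
  · rintro ⟨q, hqR, hcq, off, hoff, rfl⟩
    obtain ⟨i, hi, rfl⟩ :=
      ((PySem.Set.mem_foldl_add (PySem.List.pyRange 0 P 1) _ PySem.Set.empty off).mp hoff).resolve_left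
        (by simp [PySem.Set.empty])
    rw [PySem.List.mem_pyRange_one] at hqR
    rw [pv_mod_sub_mod D (i * ps) q hD]
    have h0 : 0 ≤ PySem.Int.mod (q - i * ps) D := PySem.Int.mod_nonneg _ hD
    have h1 : PySem.Int.mod (q - i * ps) D < D := PySem.Int.mod_lt _ hD
    refine ⟨PySem.List.mem_pyRange_one.mpr ⟨h0, h1⟩, ?_⟩
    rw [List.all_eq_false]
    refine ⟨_, List.mem_map.mpr ⟨i, hi, rfl⟩, ?_⟩
    rw [pv_mod_shift₁ D (i * ps) q hD hqR.1 hqR.2]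
    have := (pv_guard_iff D q hqR.1 hqR.2).mp hcq
    simp [this]
  · rintro ⟨hhR, hall⟩
    rw [PySem.List.mem_pyRange_one] at hhR
    rw [List.all_eq_false] at hall
    obtain ⟨x, hx, hxf⟩ := hall
    obtain ⟨i, hi, rfl⟩ := List.mem_map.mp hx
    have hq0 : 0 ≤ PySem.Int.mod (h + i * ps) D := PySem.Int.mod_nonneg _ hD
    have hq1 : PySem.Int.mod (h + i * ps) D < D := PySem.Int.mod_lt _ hD
    refine ⟨PySem.Int.mod (h + i * ps) D, PySem.List.mem_pyRange_one.mpr ⟨hq0, hq1⟩, ?_,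
      PySem.Int.mod (i * ps) D,
      (PySem.Set.mem_foldl_add _ _ _ _).mpr (Or.inr ⟨i, hi, rfl⟩), ?_⟩
    · exact (pv_guard_iff D _ hq0 hq1).mpr (by simpa using hxf)
    · rw [pv_mod_sub_mod D (i * ps) _ hD]
      exact (pv_mod_shift₂ D (i * ps) h hD hhR.1 hhR.2).symm

-- the main equality
theorem pv_main (D P : Int) (hP : P ≠ 0) :
    count_prime_instances D P = count_prime_instances_alt D P := by
  by_cases hD : D ≤ 0
  · have h1 : PySem.List.pyRange 0 D 1 = [] := PySem.List.pyRange_one_eq_nil (by omega)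
    have h2 : max D 0 = 0 := by omega
    simp [count_prime_instances, count_prime_instances_alt, h1, h2]
  · have hD' : (0:Int) < D := by omega
    have hmax : max D 0 = D := by omega
    have hDne : (D == 0) = false := by simp; omega
    simp only [count_prime_instances, count_prime_instances_alt, hmax, hDne,
      Bool.false_eq_true, if_false, PySem.Set.len]
    rw [PySem.List.foldl_count_if]
    have hmem := fun h => pv_bad_iff D P (PySem.Int.floordiv D P) h hD'
    have hinv := pv_break_inv D hD'
      ((PySem.List.pyRange 2 D 1).foldl (fun s d =>
        (PySem.List.pyRange (d * d) D d).foldl (fun s m => PySem.Set.add s m) s)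
        PySem.Set.empty)
      ((PySem.List.pyRange 0 P 1).foldl
        (fun s i => PySem.Set.add s (PySem.Int.mod (i * PySem.Int.floordiv D P) D))
        PySem.Set.empty)
      (PySem.List.pyRange 0 D 1) PySem.Set.empty false
      (by simp [PySem.Set.empty]) (by simp [PySem.Set.empty]) (by simp)
    have hnodup := hinv.1
    set p : Int → Bool := fun h =>
      ((PySem.List.pyRange 0 P 1).map
        (fun i => PySem.Int.mod (h + i * PySem.Int.floordiv D P) D)).all
        (fun hour => pvIsPrime hour) with hp
    set bad := ((PySem.List.pyRange 0 D 1).foldl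
      (pvBadStep D D
        ((PySem.List.pyRange 2 D 1).foldl (fun s d =>
          (PySem.List.pyRange (d * d) D d).foldl (fun s m => PySem.Set.add s m) s)
          PySem.Set.empty)
        ((PySem.List.pyRange 0 P 1).foldl
          (fun s i => PySem.Set.add s (PySem.Int.mod (i * PySem.Int.floordiv D P) D))
          PySem.Set.empty))
      (PySem.Set.empty, false)).1 with hbad
    have hfil : bad.Perm ((PySem.List.pyRange 0 D 1).filter (fun h => !p h)) := by
      rw [List.perm_ext_iff_of_nodup hnodup ((PySem.List.nodup_pyRange_one 0 D).filter _)]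
      intro a
      rw [List.mem_filter, hmem a, Bool.not_eq_true']
    have hlen : bad.length = (PySem.List.pyRange 0 D 1).countP (fun h => !p h) := by
      rw [hfil.length_eq, ← List.countP_eq_length_filter]
    have hsplit : (PySem.List.pyRange 0 D 1).length =
        (PySem.List.pyRange 0 D 1).countP p +
        (PySem.List.pyRange 0 D 1).countP (fun h => !p h) := by
      rw [List.length_eq_countP_add_countP p (l := PySem.List.pyRange 0 D 1)]
      congr 1
      apply List.countP_congr
      intro a _
      simp
    have hRlen : (PySem.List.pyRange 0 D 1).length = D.toNat := by
      simp [PySem.List.length_pyRange_one]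
    omega

-- ===== VERDICT (by name: the statement is the Claim_ definition above) =====
theorem count_prime_instances_spec : Claim_equal_count_prime_instances := by
  intro D P _ hP
  exact pv_main D P hP
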